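-- pv_equiv track=rewrite | github.com/b-asic-eda/b-asic | lib/b_asic/utils.py | int_to_csd
-- ===== SOURCE A (Python) =====
-- def int_to_csd(n: int) -> list[int]:
--     """
--     Return the Canonical Signed Digit (CSD) representation of an integer with MSB first.
--
--     Parameters
--     ----------
--     n : int
--         The integer to convert.
--     """
--     csd = []
--     while n != 0:
--         if n % 2 == 0:
--             csd.append(0)
--             n //= 2
--         else:
--             r = n % 4
--             if r == 1:
--                 csd.append(1)
--             else:
--                 csd.append(-1)
--             n = (n - csd[-1]) // 2
--     return csd[::-1]
-- ===== SOURCE B (Python) =====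
-- def int_to_csd(n: int) -> list[int]:
--     t = 3 * n
--     L = 0
--     while (t >> (L + 1)) != (n >> (L + 1)):
--         L += 1
--     return [((t >> i) & 1) - ((n >> i) & 1) for i in range(L, 0, -1)]
-- ===== Notes on version B (the rewrite author's own statement) =====
-- stated objective: alternative
-- what changed: Replaces the digit-by-digit loop (append LSB-first, reverse at the end) by the classic bit-twiddling NAF construction: with t = n+n+n, each CSD digit i is bit i of t minus bit i of n, so B finds the top digit position by comparing shifted t and n and then reads all digits off directly MSB-first with shifts and masks, with no division, no per-digit branching and no reversal.
import Mathlib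
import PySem

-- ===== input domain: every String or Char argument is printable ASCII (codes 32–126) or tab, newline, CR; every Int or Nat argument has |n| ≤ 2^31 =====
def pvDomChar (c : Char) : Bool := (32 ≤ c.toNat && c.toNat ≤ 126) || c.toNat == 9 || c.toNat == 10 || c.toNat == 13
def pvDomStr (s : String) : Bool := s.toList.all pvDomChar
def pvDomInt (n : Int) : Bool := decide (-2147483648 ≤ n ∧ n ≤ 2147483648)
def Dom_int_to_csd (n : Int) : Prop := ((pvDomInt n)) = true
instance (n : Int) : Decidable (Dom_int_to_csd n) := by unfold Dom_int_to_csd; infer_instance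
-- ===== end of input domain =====

-- B replaces A's branching divide-by-two loop (digits appended LSB-first, then reversed)
-- by the classic bit-trick t = n+n+n: digit i of the CSD is bit i of t minus bit i of n,
-- read off MSB-first with shifts and masks (no division, no reversal).


-- ===== PORT A =====
-- the 'while n != 0' loop, carrying the csd accumulator (digits appended LSB-first);
-- fuel n.natAbs + 1 only makes the loop total: |n| strictly decreases each iteration,
-- so the fuel never runs out before n = 0
def int_to_csd_go : Nat → Int → List Int → List Int
  | 0, _, csd => csd
  | fuel + 1, n, csd =>
    if n = 0 then csd
    else if PySem.Int.mod n 2 = 0 then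
      int_to_csd_go fuel (PySem.Int.floordiv n 2) (csd ++ [0])
    else
      let d : Int := if PySem.Int.mod n 4 = 1 then 1 else -1
      int_to_csd_go fuel (PySem.Int.floordiv (n - d) 2) (csd ++ [d])

-- csd[::-1] is List.reverse
def int_to_csd (n : Int) : List Int := (int_to_csd_go (n.natAbs + 1) n []).reverse

-- ===== PORT B =====
-- B's 'while (t >> (L+1)) != (n >> (L+1)): L += 1' search for the number of digits;
-- the counter L is a Nat (Python's L starts at 0 and only grows); fuel n.natAbs + 1
-- only makes the loop total.  Python's '>>' on int is Lean's '>>>' on Int (exact).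
def int_to_csd_find (t n : Int) : Nat → Nat → Nat
  | 0, L => L
  | fuel + 1, L => if t >>> (L + 1) ≠ n >>> (L + 1) then int_to_csd_find t n fuel (L + 1) else L

-- '[((t >> i) & 1) - ((n >> i) & 1) for i in range(L, 0, -1)]'; every i produced by
-- range(L, 0, -1) is ≥ 1, so 'i.toNat' is exact for the Nat shift amount
def int_to_csd_alt (n : Int) : List Int :=
  let t := 3 * n
  let L := int_to_csd_find t n (n.natAbs + 1) 0
  (PySem.List.pyRange (L : Int) 0 (-1)).map
    (fun i => PySem.Int.band (t >>> i.toNat) 1 - PySem.Int.band (n >>> i.toNat) 1)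

-- ===== PRECONDITION & SPEC =====
def Spec_int_to_csd (n : Int) (out : List Int) : Prop := out = int_to_csd_alt n
instance (n : Int) (out : List Int) : Decidable (Spec_int_to_csd n out) := by unfold Spec_int_to_csd; infer_instance

-- ===== CLAIM (what is proved, stated in full; the proofs are below) =====
def Claim_equal_int_to_csd : Prop := ∀ (n : Int), Dom_int_to_csd n → Spec_int_to_csd n (int_to_csd n)

-- ===== LEMMAS AND PROOFS =====

-- shift by one is (floor) division by two
theorem shr_one (x : Int) : x >>> (1 : Nat) = x / 2 := by
  have h := Int.shiftRight_eq_div_pow x 1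
  norm_num at h
  exact h

-- shift by k+1 is shift by k then by one
theorem shr_succ (x : Int) (k : Nat) : x >>> (k + 1) = (x >>> k) >>> (1 : Nat) :=
  Int.shiftRight_add x k 1

-- the invariant carried down the levels: x = 3y + c with 0 ≤ c ≤ 2
def ShiftInv (x y : Int) : Prop := 0 ≤ x - 3 * y ∧ x - 3 * y ≤ 2

theorem shiftInv_init (n : Int) : ShiftInv ((3 * n) >>> (1 : Nat)) (n >>> (1 : Nat)) := by
  constructor <;> · rw [shr_one, shr_one]; omega

theorem diff_init (n : Int) : (3 * n) >>> (1 : Nat) - n >>> (1 : Nat) = n := by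
  rw [shr_one, shr_one]; omega

theorem shiftInv_step {x y : Int} (h : ShiftInv x y) :
    ShiftInv (x >>> (1 : Nat)) (y >>> (1 : Nat)) := by
  obtain ⟨h1, h2⟩ := h
  constructor <;> · rw [shr_one, shr_one]; omega

theorem diff_decrease {x y : Int} (h : ShiftInv x y) (h0 : x - y ≠ 0) :
    (x >>> (1 : Nat) - y >>> (1 : Nat)).natAbs < (x - y).natAbs := by
  obtain ⟨h1, h2⟩ := h; rw [shr_one, shr_one]; omega

-- one step of A's loop body, expressed through the bits of x and y
theorem digit_even {x y : Int} (hpar : PySem.Int.mod (x - y) 2 = 0) :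
    x % 2 - y % 2 = 0 := by
  rw [PySem.Int.mod_eq_emod_of_pos (by norm_num)] at hpar; omega

theorem next_even {x y : Int} (hpar : PySem.Int.mod (x - y) 2 = 0) :
    PySem.Int.floordiv (x - y) 2 = x >>> (1 : Nat) - y >>> (1 : Nat) := by
  rw [PySem.Int.mod_eq_emod_of_pos (by norm_num)] at hpar
  rw [PySem.Int.floordiv_eq_ediv_of_pos (by norm_num), shr_one, shr_one]; omega

theorem digit_odd_one {x y : Int} (h : ShiftInv x y)
    (h4 : PySem.Int.mod (x - y) 4 = 1) :
    x % 2 - y % 2 = 1 := by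
  obtain ⟨h1, h2⟩ := h
  rw [PySem.Int.mod_eq_emod_of_pos (by norm_num)] at h4; omega

theorem digit_odd_neg {x y : Int} (h : ShiftInv x y)
    (hpar : ¬ PySem.Int.mod (x - y) 2 = 0) (h4 : ¬ PySem.Int.mod (x - y) 4 = 1) :
    x % 2 - y % 2 = -1 := by
  obtain ⟨h1, h2⟩ := h
  rw [PySem.Int.mod_eq_emod_of_pos (by norm_num)] at hpar h4; omega

theorem next_odd (x y : Int) :
    PySem.Int.floordiv (x - y - (x % 2 - y % 2)) 2 = x >>> (1 : Nat) - y >>> (1 : Nat) := by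
  rw [PySem.Int.floordiv_eq_ediv_of_pos (by norm_num), shr_one, shr_one]; omega

-- the common digit formula: digit j = bit j of t minus bit j of n
def csdDigit (t n : Int) (j : Nat) : Int := (t >>> j) % 2 - (n >>> j) % 2

-- the joint characterisation of A's loop and B's length search, by induction on fuel:
-- starting at level k with the invariant and enough fuel, the search returns k + m and
-- the loop appends exactly the digits at levels k+1, …, k+m
theorem key (t n : Int) : ∀ (fuel k : Nat),
    (t >>> (k + 1) - n >>> (k + 1)).natAbs ≤ fuel →
    ShiftInv (t >>> (k + 1)) (n >>> (k + 1)) →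
    ∃ m : Nat, int_to_csd_find t n fuel k = k + m ∧
      ∀ csd : List Int, int_to_csd_go fuel (t >>> (k + 1) - n >>> (k + 1)) csd
        = csd ++ (List.range' (k + 1) m).map (csdDigit t n) := by
  intro fuel
  induction fuel with
  | zero =>
    intro k hle _
    refine ⟨0, rfl, ?_⟩
    intro csd
    have h0 : t >>> (k + 1) - n >>> (k + 1) = 0 := by omega
    simp [int_to_csd_go]
  | succ fuel ih =>
    intro k hle hinv
    by_cases h0 : t >>> (k + 1) - n >>> (k + 1) = 0
    · refine ⟨0, ?_, ?_⟩
      · show (if t >>> (k + 1) ≠ n >>> (k + 1) then int_to_csd_find t n fuel (k + 1) else k) = k + 0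
        rw [if_neg (by omega)]; rfl
      · intro csd
        rw [int_to_csd_go, if_pos h0]
        simp
    · -- one real step: shift once more and use the induction hypothesis at level k+1
      have hshift_t := shr_succ t (k + 1)
      have hshift_n := shr_succ n (k + 1)
      have hdec := diff_decrease hinv h0
      have hinv' : ShiftInv (t >>> (k + 1 + 1)) (n >>> (k + 1 + 1)) := by
        rw [hshift_t, hshift_n]; exact shiftInv_step hinv
      have hle' : (t >>> (k + 1 + 1) - n >>> (k + 1 + 1)).natAbs ≤ fuel := by
        rw [hshift_t, hshift_n]; omega
      obtain ⟨m, hfind, hgo⟩ := ih (k + 1) hle' hinv'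
      refine ⟨m + 1, ?_, ?_⟩
      · show (if t >>> (k + 1) ≠ n >>> (k + 1) then int_to_csd_find t n fuel (k + 1) else k) = k + (m + 1)
        rw [if_pos (by omega), hfind]; omega
      · intro csd
        rw [int_to_csd_go, if_neg h0]
        have hrange : List.range' (k + 1) (m + 1) = (k + 1) :: List.range' (k + 1 + 1) m := by
          simp [List.range'_succ]
        by_cases hpar : PySem.Int.mod (t >>> (k + 1) - n >>> (k + 1)) 2 = 0
        · rw [if_pos hpar, next_even hpar, ← hshift_t, ← hshift_n, hgo, hrange]
          have hd : csdDigit t n (k + 1) = 0 := digit_even hpar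
          simp [hd]
        · rw [if_neg hpar]
          by_cases h4 : PySem.Int.mod (t >>> (k + 1) - n >>> (k + 1)) 4 = 1
          · rw [if_pos h4]
            have hd : csdDigit t n (k + 1) = 1 := digit_odd_one hinv h4
            have hnext := next_odd (t >>> (k + 1)) (n >>> (k + 1))
            rw [show (t >>> (k + 1)) % 2 - (n >>> (k + 1)) % 2 = csdDigit t n (k + 1) from rfl,
              hd] at hnext
            show int_to_csd_go fuel
                (PySem.Int.floordiv (t >>> (k + 1) - n >>> (k + 1) - 1) 2) (csd ++ [(1 : Int)])
              = csd ++ List.map (csdDigit t n) (List.range' (k + 1) (m + 1))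
            rw [hnext, ← hshift_t, ← hshift_n, hgo, hrange]
            simp [hd]
          · rw [if_neg h4]
            have hd : csdDigit t n (k + 1) = -1 := digit_odd_neg hinv hpar h4
            have hnext := next_odd (t >>> (k + 1)) (n >>> (k + 1))
            rw [show (t >>> (k + 1)) % 2 - (n >>> (k + 1)) % 2 = csdDigit t n (k + 1) from rfl,
              hd] at hnext
            show int_to_csd_go fuel
                (PySem.Int.floordiv (t >>> (k + 1) - n >>> (k + 1) - (-1)) 2) (csd ++ [(-1 : Int)])
              = csd ++ List.map (csdDigit t n) (List.range' (k + 1) (m + 1))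
            rw [hnext, ← hshift_t, ← hshift_n, hgo, hrange]
            simp [hd]

-- the reversed MSB-first read-off equals the reverse of the LSB-first digit list
theorem reverse_map_range' (f : Nat → Int) (m : Nat) :
    ((List.range' 1 m).map f).reverse = (List.range m).map (fun k => f (m - k)) := by
  apply List.ext_getElem
  · simp
  · intro i h1 h2
    simp only [List.length_reverse, List.length_map, List.length_range', List.length_range] at h1 h2
    simp only [List.getElem_reverse, List.getElem_map, List.getElem_range', List.getElem_range,
      List.length_map, List.length_range']
    congr 1
    omega

-- ===== VERDICT (by name: the statement is the Claim_ definition above) =====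
theorem int_to_csd_spec : Claim_equal_int_to_csd := by
  intro n _
  show int_to_csd n = int_to_csd_alt n
  have hbound : ((3 * n) >>> ((0 : Nat) + 1) - n >>> ((0 : Nat) + 1)).natAbs ≤ n.natAbs + 1 := by
    simp only [Nat.zero_add]
    rw [diff_init]; omega
  have hinv0 : ShiftInv ((3 * n) >>> ((0 : Nat) + 1)) (n >>> ((0 : Nat) + 1)) := by
    simp only [Nat.zero_add]; exact shiftInv_init n
  obtain ⟨m, hfind, hgo⟩ := key (3 * n) n (n.natAbs + 1) 0 hbound hinv0
  have hgo0 := hgo []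
  simp only [Nat.zero_add] at hgo0 hfind
  rw [diff_init] at hgo0
  rw [int_to_csd, int_to_csd_alt]
  simp only [hfind]
  rw [hgo0, List.nil_append, PySem.List.pyRange_neg_one, reverse_map_range']
  have htoNat : ((m : Int) - (0 : Int)).toNat = m := by omega
  rw [htoNat, List.map_map]
  apply List.map_congr_left
  intro k hk
  rw [List.mem_range] at hk
  have h1 : ((m : Int) - (k : Int)).toNat = m - k := by omega
  simp only [Function.comp, h1, PySem.Int.band_one,
    PySem.Int.mod_eq_emod_of_pos (by norm_num : (0 : Int) < 2)]
  simp [csdDigit, Int.shiftRight_natCast_right]
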